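-- pv_equiv track=rewrite | github.com/octavianModreanu/DistributedRepresentation | Categorizer.py | count_vector
-- ===== SOURCE A (Python) =====
-- from collections import Counter
--
-- def count_vector(vector):
--     vector_count = Counter(vector)
--     count = []
--     sum = 0
--     for i in vector_count:
--         if i > 0:
--             count.append(vector_count[i])
--     for i in count:
--         sum += i
--     return sum
-- ===== SOURCE B (Python) =====
-- def count_vector(vector):
--     count = 0
--     for x in vector:
--         if x > 0:
--             count += 1
--     return count
-- ===== Notes on version B (the rewrite author's own statement) =====
-- stated objective: simpler
-- what changed: Replaces A's build-a-Counter-then-two-loops (collect counts of positive keys into a list, then sum the list) with one direct pass that keeps a single running count of elements > 0.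
import Mathlib
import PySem

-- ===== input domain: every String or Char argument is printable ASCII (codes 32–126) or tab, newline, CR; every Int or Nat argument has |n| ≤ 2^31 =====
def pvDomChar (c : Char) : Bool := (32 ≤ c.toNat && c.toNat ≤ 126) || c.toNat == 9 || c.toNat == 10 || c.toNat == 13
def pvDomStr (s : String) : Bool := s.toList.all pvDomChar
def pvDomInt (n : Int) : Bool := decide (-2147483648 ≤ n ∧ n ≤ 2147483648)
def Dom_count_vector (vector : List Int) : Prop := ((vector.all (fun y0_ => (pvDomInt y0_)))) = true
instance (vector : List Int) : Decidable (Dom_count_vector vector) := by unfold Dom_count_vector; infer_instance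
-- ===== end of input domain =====

-- B replaces A's Counter-then-two-loops decomposition with a single running count of elements > 0 (simpler).

-- ===== PORT A =====
def count_vector (vector : List Int) : Int :=
  let vector_count := PySem.Dict.counter vector
  let count := vector_count.keys.foldl
    (fun acc i => if i > 0 then acc ++ [vector_count.getD i 0] else acc) ([] : List Int)
  count.foldl (fun s i => s + i) 0

-- ===== PORT B =====
def count_vector_alt (vector : List Int) : Int :=
  vector.foldl (fun count x => if x > 0 then count + 1 else count) 0

-- ===== PRECONDITION & SPEC =====
def Spec_count_vector (vector : List Int) (out : Int) : Prop := out = count_vector_alt vector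
instance (vector : List Int) (out : Int) : Decidable (Spec_count_vector vector out) := by unfold Spec_count_vector; infer_instance

-- ===== CLAIM (what is proved, stated in full; the proofs are below) =====
def Claim_equal_count_vector : Prop := ∀ (vector : List Int), Dom_count_vector vector → Spec_count_vector vector (count_vector vector)

-- ===== LEMMAS AND PROOFS =====

-- Sum of 0/1 indicators of equality with x over a Nodup list is the membership indicator.
lemma sum_ite_eq_mem (x : Int) : ∀ (m : List Int), m.Nodup →
    (m.map (fun i => if i == x then (1 : Int) else 0)).sum = if x ∈ m then 1 else 0 := by
  intro m
  induction m with
  | nil => simp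
  | cons a m ih =>
    intro hnd
    rcases List.nodup_cons.mp hnd with ⟨ha, hm⟩
    by_cases hax : a = x
    · subst hax
      rw [List.map_cons, List.sum_cons, ih hm]
      simp [ha]
    · have hx : (a == x) = false := by simp [hax]
      simp only [List.map_cons, List.sum_cons, hx, ih hm, List.mem_cons]
      have : (x = a) ↔ False := by constructor <;> intro h <;> simp_all
      simp [this]

-- Summing multiplicities of the positive distinct elements counts the positive elements.
lemma sum_counts_eq_countP (p : Int → Bool) : ∀ (v l : List Int), l.Nodup → (∀ x ∈ v, x ∈ l) →
    ((l.filter p).map (fun i => ((List.count i v : Nat) : Int))).sum = (v.countP p : Int) := by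
  intro v
  induction v with
  | nil => intro l _ _; simp
  | cons x v ih =>
    intro l hnd hmem
    have hx : x ∈ l := hmem x (by simp)
    have hv : ∀ y ∈ v, y ∈ l := fun y hy => hmem y (by simp [hy])
    have hfn : (fun i => ((List.count i (x :: v) : Nat) : Int))
        = fun i => ((List.count i v : Nat) : Int) + (if i == x then (1 : Int) else 0) := by
      funext i
      rw [List.count_cons]
      by_cases h : i = x
      · subst h; simp
      · have hb : (i == x) = false := by simp [h]
        simp [hb]
        exact fun hh => h hh.symm
    rw [hfn, PySem.List.sum_map_add_int, ih l hnd hv,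
        sum_ite_eq_mem x _ (hnd.filter p), List.countP_cons]
    by_cases hp : p x = true
    · simp [List.mem_filter, hx, hp]
    · have : x ∉ l.filter p := by simp [List.mem_filter, hp]
      simp [this, hp]

lemma foldl_sum_id (a : Int) (l : List Int) : l.foldl (fun s i => s + i) a = a + l.sum := by
  induction l generalizing a with
  | nil => simp
  | cons x l ih => simp [List.foldl_cons, ih, List.sum_cons]; ring

-- ===== VERDICT (by name: the statement is the Claim_ definition above) =====
theorem count_vector_spec : Claim_equal_count_vector := by
  intro v _
  unfold Spec_count_vector count_vector count_vector_alt
  simp only [PySem.Dict.keys_counter, PySem.List.foldl_append_ite, PySem.Dict.getD_counter,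
    PySem.List.foldl_ite_add_one, List.nil_append, foldl_sum_id, zero_add]
  exact sum_counts_eq_countP _ v _ (PySem.Set.nodup_ofList v)
    (fun x hx => (PySem.Set.mem_ofList v x).mpr hx)
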